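-- pv_equiv track=rewrite | github.com/getdaniel/alx-interview | 0x01-lockboxes/0-lockboxes.py | canUnlockAll
-- ===== SOURCE A (Python) =====
-- def canUnlockAll(boxes):
--     """Return True if all boxes can be opened, else return False."""
--     n = len(boxes)
--     opened_boxes = set([0])
--     unoppened_boxes = set(boxes[0]).difference(set([0]))
--
--     while len(unoppened_boxes) > 0:
--         box_key = unoppened_boxes.pop()
--
--         if not box_key or box_key >= n or box_key < 0:
--             continue
--         if box_key not in opened_boxes:
--             unoppened_boxes = unoppened_boxes.union(boxes[box_key])
--             opened_boxes.add(box_key)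
--
--     return n == len(opened_boxes)
-- ===== SOURCE B (Python) =====
-- def canUnlockAll(boxes):
--     """Return True if all boxes can be opened, else return False."""
--     n = len(boxes)
--     opened = [False] * n
--     opened[0] = True
--     changed = True
--     while changed:
--         changed = False
--         for i in range(n):
--             if opened[i]:
--                 for key in boxes[i]:
--                     if 0 < key < n and not opened[key]:
--                         opened[key] = True
--                         changed = True
--     return all(opened)
-- ===== Notes on version B (the rewrite author's own statement) =====
-- stated objective: alternative
-- what changed: Replaced A's frontier worklist (pop one pending key at a time from an unopened set, re-unioning whole key lists) by frontierless fixed-point iteration: repeated full relaxation passes over all boxes, marking any key reachable from an already-opened box, until a complete pass changes nothing (Bellman-Ford-style closure, no worklist/stack/queue at all).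
import Mathlib
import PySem

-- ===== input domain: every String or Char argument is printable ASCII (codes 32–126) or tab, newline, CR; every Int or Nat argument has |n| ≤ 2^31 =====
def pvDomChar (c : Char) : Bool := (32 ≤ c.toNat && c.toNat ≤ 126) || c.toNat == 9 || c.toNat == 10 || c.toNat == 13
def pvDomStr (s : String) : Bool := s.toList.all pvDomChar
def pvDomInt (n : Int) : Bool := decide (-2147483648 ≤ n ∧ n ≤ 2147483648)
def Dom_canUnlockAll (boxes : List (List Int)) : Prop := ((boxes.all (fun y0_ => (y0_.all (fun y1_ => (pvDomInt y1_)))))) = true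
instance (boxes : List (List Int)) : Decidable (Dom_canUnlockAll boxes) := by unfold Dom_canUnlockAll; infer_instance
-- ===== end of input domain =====

-- B replaces A's worklist (pop pending keys one at a time from an unopened set) by frontierless
-- fixed-point iteration: full relaxation passes over all boxes until a pass changes nothing
-- (objective: alternative algorithm, no worklist at all).

-- ===== PORT A =====
-- A pops from a Python set, whose element choice is unspecified (hash order); the port pops
-- the head of the PySem.Set's list.  The Bool A returns does not depend on which element is
-- popped (the loop saturates to the reachable set, as the lemmas below prove), so the port
-- is exact on A's return value.
def loopA (boxes : List (List Int)) (n : Nat) (opened unopened : PySem.Set Int) :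
    PySem.Set Int :=
  match unopened with
  | [] => opened
  | box_key :: rest =>
    -- if not box_key or box_key >= n or box_key < 0: continue
    if box_key = 0 ∨ (n : Int) ≤ box_key ∨ box_key < 0 then
      loopA boxes n opened rest
    -- if box_key not in opened_boxes:
    else if PySem.Set.contains opened box_key then
      loopA boxes n opened rest
    else
      loopA boxes n (PySem.Set.add opened box_key)
        (PySem.Set.union rest (PySem.List.pyGetD boxes box_key []))
termination_by
  (((List.range n).filter (fun i : Nat => !(PySem.Set.contains opened (i : Int)))).length,
   unopened.length)
decreasing_by
  · exact Prod.Lex.right _ (Nat.lt_succ_self _)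
  · exact Prod.Lex.right _ (Nat.lt_succ_self _)
  · apply Prod.Lex.left
    rename_i hval hmem
    have hnm : box_key ∉ opened := by
      simpa [PySem.Set.contains_iff] using hmem
    have h0 : 0 < box_key := by omega
    have hEq : (List.range n).filter
        (fun i : Nat => !(PySem.Set.contains (PySem.Set.add opened box_key) (i : Int))) =
        ((List.range n).filter (fun i : Nat => !(PySem.Set.contains opened (i : Int)))).filter
          (fun i : Nat => !((i : Int) == box_key)) := by
      rw [List.filter_filter]
      apply List.filter_congr
      intro i _
      by_cases h1 : (i : Int) ∈ opened <;> by_cases h2 : (i : Int) = box_key <;>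
        simp [PySem.Set.mem_add, h1, h2]
    rw [hEq]
    apply List.length_filter_lt_length_iff_exists.mpr
    refine ⟨box_key.toNat, ?_, ?_⟩
    · simp only [List.mem_filter]
      have hbk : box_key.toNat < n := by omega
      refine ⟨List.mem_range.mpr hbk, ?_⟩
      simp only [Bool.not_eq_eq_eq_not, Bool.not_true,
        PySem.Set.contains_eq_listContains]
      simp only [List.contains_eq_mem, decide_eq_false_iff_not]
      intro hc
      exact hnm (by simpa [Int.toNat_of_nonneg (le_of_lt h0)] using hc)
    · simp [Int.toNat_of_nonneg (le_of_lt h0)]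

def canUnlockAll (boxes : List (List Int)) : Bool :=
  let n := boxes.length
  let opened_boxes : PySem.Set Int := PySem.Set.ofList [(0 : Int)]
  let unoppened_boxes : PySem.Set Int :=
    PySem.Set.diff (PySem.Set.ofList (boxes.headD [])) (PySem.Set.ofList [(0 : Int)])
  (n : Int) == PySem.Set.len (loopA boxes n opened_boxes unoppened_boxes)

-- ===== PORT B =====
-- `opened[key]` is read with default `true`: inside the short-circuited guard
-- `0 < key < n = len(opened)` the index is always in range, so the default is never the
-- value Python reads.  The pair's second component is the `changed` flag.
def innerC (n : Nat) (st : List Bool × Bool) (key : Int) : List Bool × Bool :=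
  if 0 < key ∧ key < (n : Int) ∧ PySem.List.pyGetD st.1 key true = false then
    (PySem.List.pySetD st.1 key true, true)
  else st

-- `if opened[i]:` then the inner `for key in boxes[i]` loop; i comes from range(n), in range.
def passStep (boxes : List (List Int)) (n : Nat) (st : List Bool × Bool) (i : Nat) :
    List Bool × Bool :=
  if PySem.List.pyGetD st.1 (i : Int) false = true then
    (PySem.List.pyGetD boxes (i : Int) []).foldl (innerC n) st
  else st

-- one full `for i in range(n)` pass, started with changed = False
def passB (boxes : List (List Int)) (n : Nat) (opened : List Bool) : List Bool × Bool :=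
  (List.range n).foldl (passStep boxes n) (opened, false)

-- Step property used only for loopC's termination: a pass either leaves the state
-- untouched or sets the flag and strictly shrinks the number of unopened boxes.
def StP (st r : List Bool × Bool) : Prop :=
  r = st ∨ (r.2 = true ∧ r.1.count false < st.1.count false)

theorem stP_trans {a b c : List Bool × Bool} (h1 : StP a b) (h2 : StP b c) : StP a c := by
  rcases h1 with h1 | h1
  · rwa [h1] at h2
  · rcases h2 with h2 | h2
    · rw [h2]; exact Or.inr h1
    · exact Or.inr ⟨h2.1, lt_trans h2.2 h1.2⟩

-- cited by loopC's decreasing_by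
theorem count_set_true_lt (l : List Bool) (i : Nat) (h : l.getD i true = false) :
    (l.set i true).count false < l.count false := by
  induction l generalizing i with
  | nil => simp at h
  | cons b t ih =>
    cases i with
    | zero =>
      simp only [List.getD_cons_zero] at h
      subst h
      simp
    | succ i =>
      simp only [List.getD_cons_succ] at h
      simp only [List.set_cons_succ, List.count_cons]
      have := ih i h
      omega

theorem innerC_stP (n : Nat) (st : List Bool × Bool) (k : Int) : StP st (innerC n st k) := by
  by_cases hg : 0 < k ∧ k < (n : Int) ∧ PySem.List.pyGetD st.1 k true = false
  · right
    simp only [innerC, if_pos hg]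
    refine ⟨trivial, ?_⟩
    rw [PySem.List.pySetD_of_nonneg _ _ (le_of_lt hg.1)]
    apply count_set_true_lt
    have h2 := hg.2.2
    rw [show k = ((k.toNat : Nat) : Int) from by omega, PySem.List.pyGetD_natCast] at h2
    exact h2
  · left; simp [innerC, hg]

theorem foldl_stP {α : Type} (f : List Bool × Bool → α → List Bool × Bool)
    (hf : ∀ st x, StP st (f st x)) (l : List α) (st : List Bool × Bool) :
    StP st (l.foldl f st) := by
  induction l generalizing st with
  | nil => exact Or.inl rfl
  | cons x l ih => exact stP_trans (hf st x) (ih (f st x))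

theorem passStep_stP (boxes : List (List Int)) (n : Nat) (st : List Bool × Bool) (i : Nat) :
    StP st (passStep boxes n st i) := by
  by_cases h : PySem.List.pyGetD st.1 (i : Int) false = true
  · simp only [passStep, if_pos h]
    exact foldl_stP _ (innerC_stP n) _ st
  · simp only [passStep, if_neg h]
    exact Or.inl rfl

theorem passB_stP (boxes : List (List Int)) (n : Nat) (opened : List Bool) :
    StP (opened, false) (passB boxes n opened) :=
  foldl_stP _ (passStep_stP boxes n) _ _

-- while changed: ... — terminates because each changing pass opens at least one new box
def loopC (boxes : List (List Int)) (n : Nat) (opened : List Bool) : List Bool :=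
  if h : (passB boxes n opened).2 = true then loopC boxes n (passB boxes n opened).1
  else (passB boxes n opened).1
termination_by opened.count false
decreasing_by
  rcases passB_stP boxes n opened with he | hlt
  · exfalso
    rw [he] at h
    simp at h
  · exact hlt.2

def canUnlockAll_alt (boxes : List (List Int)) : Bool :=
  let n := boxes.length
  let opened := PySem.List.pySetD (List.replicate n false) 0 true
  (loopC boxes n opened).all (fun b => b)

-- ===== PRECONDITION & SPEC =====
-- A evaluates boxes[0] (and B assigns opened[0]) unconditionally: both raise IndexError on
-- the empty list, so it is excluded.
def Pre_canUnlockAll (boxes : List (List Int)) : Prop := boxes ≠ []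
instance (boxes : List (List Int)) : Decidable (Pre_canUnlockAll boxes) := by
  unfold Pre_canUnlockAll; infer_instance
def pvWitness_canUnlockAll : List (List Int) := [[1], [0]]
def Spec_canUnlockAll (boxes : List (List Int)) (out : Bool) : Prop := out = canUnlockAll_alt boxes
instance (boxes : List (List Int)) (out : Bool) : Decidable (Spec_canUnlockAll boxes out) := by
  unfold Spec_canUnlockAll; infer_instance

-- ===== CLAIM (what is proved, stated in full; the proofs are below) =====
def Claim_equal_canUnlockAll : Prop := ∀ (boxes : List (List Int)), Dom_canUnlockAll boxes → Pre_canUnlockAll boxes → Spec_canUnlockAll boxes (canUnlockAll boxes)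

-- ===== LEMMAS AND PROOFS =====

-- Edge relation of the lockboxes graph and reachability from box 0.
def nE (boxes : List (List Int)) (i j : Nat) : Prop :=
  0 < j ∧ j < boxes.length ∧ (j : Int) ∈ boxes.getD i []

def Reach (boxes : List (List Int)) (j : Nat) : Prop :=
  Relation.ReflTransGen (nE boxes) 0 j

theorem reach_lt (boxes : List (List Int)) (h0 : 0 < boxes.length) {j : Nat}
    (h : Reach boxes j) : j < boxes.length := by
  induction h with
  | refl => exact h0
  | tail _ e _ => exact e.2.1

-- getD/set bookkeeping for the boolean visited array
theorem getD_true_lt_length (l : List Bool) (m : Nat) (h : l.getD m false = true) :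
    m < l.length := by
  by_contra hm
  rw [List.getD_eq_default _ _ (Nat.le_of_not_lt hm)] at h
  simp at h

theorem getD_set_true_self (l : List Bool) (i : Nat) (h : i < l.length) :
    (l.set i true).getD i false = true := by
  rw [List.getD_eq_getElem _ _ (by simpa using h)]
  exact List.getElem_set_self _

theorem getD_set_true_ne (l : List Bool) (i m : Nat) (d : Bool) (h : m ≠ i) :
    (l.set i true).getD m d = l.getD m d := by
  by_cases hm : m < l.length
  · rw [List.getD_eq_getElem _ _ (by simpa using hm), List.getD_eq_getElem _ _ hm]
    exact List.getElem_set_ne (fun he => h he.symm) _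
  · rw [List.getD_eq_default _ _ (by simpa using Nat.le_of_not_lt hm),
      List.getD_eq_default _ _ (Nat.le_of_not_lt hm)]

theorem getD_set_true_mono (l : List Bool) (i m : Nat) (h : l.getD m false = true) :
    (l.set i true).getD m false = true := by
  by_cases hm : m = i
  · subst hm; exact getD_set_true_self l m (getD_true_lt_length l m h)
  · rw [getD_set_true_ne l i m false hm]; exact h

-- ---- A side: the worklist loop saturates to the reachable set ----

theorem loopA_char (boxes : List (List Int)) :
    ∀ (opened unopened : PySem.Set Int),
    List.Nodup opened →
    (0 : Int) ∈ opened →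
    (∀ x ∈ opened, ∃ m : Nat, x = (m : Int) ∧ m < boxes.length ∧ Reach boxes m) →
    (∀ x ∈ unopened, ∀ m : Nat, x = (m : Int) → 0 < m → m < boxes.length → Reach boxes m) →
    (∀ m : Nat, (m : Int) ∈ opened → ∀ j : Nat, nE boxes m j →
        (j : Int) ∈ opened ∨ (j : Int) ∈ unopened) →
    (loopA boxes boxes.length opened unopened).Nodup ∧
    (∀ x ∈ loopA boxes boxes.length opened unopened,
        ∃ m : Nat, x = (m : Int) ∧ m < boxes.length ∧ Reach boxes m) ∧
    (∀ j : Nat, Reach boxes j → (j : Int) ∈ loopA boxes boxes.length opened unopened) := by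
  intro opened unopened
  induction opened, unopened using loopA.induct boxes boxes.length with
  | case1 opened =>
    intro h1 h2 h3 _ h5
    simp only [loopA]
    refine ⟨h1, h3, fun j hr => ?_⟩
    induction hr with
    | refl => exact h2
    | tail _ e ihr =>
      rcases h5 _ ihr _ e with h | h
      · exact h
      · simp at h
  | case2 opened box_key rest hcond ih =>
    intro h1 h2 h3 h4 h5
    simp only [loopA, if_pos hcond]
    refine ih h1 h2 h3 (fun x hx => h4 x (List.mem_cons_of_mem _ hx)) ?_
    intro m hm j hj
    rcases h5 m hm j hj with h | h
    · exact Or.inl h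
    · rcases List.mem_cons.mp h with h' | h'
      · exfalso
        obtain ⟨hj0, hjn, _⟩ := hj
        omega
      · exact Or.inr h'
  | case3 opened box_key rest hval hcont ih =>
    intro h1 h2 h3 h4 h5
    simp only [loopA, if_neg hval, if_pos hcont]
    refine ih h1 h2 h3 (fun x hx => h4 x (List.mem_cons_of_mem _ hx)) ?_
    intro m hm j hj
    rcases h5 m hm j hj with h | h
    · exact Or.inl h
    · rcases List.mem_cons.mp h with h' | h'
      · exact Or.inl (h' ▸ (PySem.Set.contains_iff _ _).mp hcont)
      · exact Or.inr h'
  | case4 opened box_key rest hval hcont ih =>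
    intro h1 h2 h3 h4 h5
    simp only [loopA, if_neg hval, if_neg hcont]
    have hnm : box_key ∉ opened := by simpa [PySem.Set.contains_iff] using hcont
    have h0 : 0 < box_key := by omega
    have hn : box_key < (boxes.length : Int) := by omega
    have hcast : box_key = ((box_key.toNat : Nat) : Int) := by omega
    have hmBn : box_key.toNat < boxes.length := by omega
    have hReachB : Reach boxes box_key.toNat :=
      h4 box_key (List.mem_cons_self) box_key.toNat hcast (by omega) hmBn
    have hgetD : PySem.List.pyGetD boxes box_key [] = boxes.getD box_key.toNat [] := by
      conv_lhs => rw [hcast]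
      rw [PySem.List.pyGetD_natCast]
    refine ih (PySem.Set.nodup_add _ _ h1) ((PySem.Set.mem_add _ _ _).mpr (Or.inl h2))
      ?_ ?_ ?_
    · intro x hx
      rcases (PySem.Set.mem_add _ _ _).mp hx with h | h
      · exact h3 x h
      · exact ⟨box_key.toNat, by rw [h]; exact hcast, hmBn, hReachB⟩
    · intro x hx m hxm hm0 hmn
      rcases (PySem.Set.mem_union _ _ _).mp hx with h | h
      · exact h4 x (List.mem_cons_of_mem _ h) m hxm hm0 hmn
      · rw [hgetD] at h
        exact Relation.ReflTransGen.tail hReachB ⟨hm0, hmn, by rwa [← hxm]⟩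
    · intro m hm j hj
      rcases (PySem.Set.mem_add _ _ _).mp hm with h | h
      · rcases h5 m h j hj with h' | h'
        · exact Or.inl ((PySem.Set.mem_add _ _ _).mpr (Or.inl h'))
        · rcases List.mem_cons.mp h' with h'' | h''
          · exact Or.inl ((PySem.Set.mem_add _ _ _).mpr (Or.inr h''))
          · exact Or.inr ((PySem.Set.mem_union _ _ _).mpr (Or.inl h''))
      · have hmm : m = box_key.toNat := by omega
        subst hmm
        refine Or.inr ((PySem.Set.mem_union _ _ _).mpr (Or.inr ?_))
        rw [hgetD]
        exact hj.2.2

theorem canUnlockAll_char (boxes : List (List Int)) (hne : boxes ≠ []) :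
    canUnlockAll boxes = true ↔ ∀ j < boxes.length, Reach boxes j := by
  have h0n : 0 < boxes.length := List.length_pos_of_ne_nil hne
  have hhd : boxes.headD [] = boxes.getD 0 [] := by
    cases boxes with
    | nil => rfl
    | cons a t => rfl
  show ((boxes.length : Int) == PySem.Set.len (loopA boxes boxes.length
      (PySem.Set.ofList [(0 : Int)])
      (PySem.Set.diff (PySem.Set.ofList (boxes.headD [])) (PySem.Set.ofList [(0 : Int)])))) = true
    ↔ ∀ j < boxes.length, Reach boxes j
  obtain ⟨hnd, hsound, hcomp⟩ := loopA_char boxes (PySem.Set.ofList [(0 : Int)])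
      (PySem.Set.diff (PySem.Set.ofList (boxes.headD [])) (PySem.Set.ofList [(0 : Int)]))
      (PySem.Set.nodup_ofList _)
      ((PySem.Set.mem_ofList _ _).mpr (by simp))
      (by
        intro x hx
        have hx0 : x = 0 := by simpa [PySem.Set.mem_ofList] using hx
        exact ⟨0, by simpa using hx0, h0n, Relation.ReflTransGen.refl⟩)
      (by
        intro x hx m hxm hm0 hmn
        obtain ⟨hx1, _⟩ := (PySem.Set.mem_diff _ _ _).mp hx
        have hx2 : x ∈ boxes.headD [] := (PySem.Set.mem_ofList _ _).mp hx1
        refine Relation.ReflTransGen.single ⟨hm0, hmn, ?_⟩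
        rw [← hhd]
        rwa [← hxm])
      (by
        intro m hm j hj
        have hm0 : m = 0 := by
          have h00 : (m : Int) = 0 := by simpa [PySem.Set.mem_ofList] using hm
          omega
        subst hm0
        refine Or.inr ((PySem.Set.mem_diff _ _ _).mpr ⟨?_, ?_⟩)
        · refine (PySem.Set.mem_ofList _ _).mpr ?_
          rw [hhd]
          exact hj.2.2
        · have hj1 := hj.1
          simp [PySem.Set.mem_ofList]
          omega)
  set O := loopA boxes boxes.length (PySem.Set.ofList [(0 : Int)])
      (PySem.Set.diff (PySem.Set.ofList (boxes.headD [])) (PySem.Set.ofList [(0 : Int)])) with hO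
  have hlenO : PySem.Set.len O = (O.length : Int) := rfl
  rw [hlenO, beq_iff_eq, Nat.cast_inj]
  have hsub : O ⊆ (List.range boxes.length).map (fun m : Nat => (m : Int)) := by
    intro x hx
    obtain ⟨m, hxm, hmn, _⟩ := hsound x hx
    subst hxm
    exact List.mem_map.mpr ⟨m, List.mem_range.mpr hmn, rfl⟩
  have hRnd : ((List.range boxes.length).map (fun m : Nat => (m : Int))).Nodup :=
    List.Nodup.map (fun a b h => by exact_mod_cast h) (List.nodup_range)
  have hRlen : ((List.range boxes.length).map (fun m : Nat => (m : Int))).length = boxes.length := by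
    simp
  constructor
  · intro hlen j hj
    have hperm : List.Perm O ((List.range boxes.length).map (fun m : Nat => (m : Int))) :=
      (List.subperm_of_subset hnd hsub).perm_of_length_le (by omega)
    have hjO : (j : Int) ∈ O :=
      hperm.mem_iff.mpr (List.mem_map.mpr ⟨j, List.mem_range.mpr hj, rfl⟩)
    obtain ⟨m, hjm, _, hr⟩ := hsound _ hjO
    rwa [show j = m from by exact_mod_cast hjm]
  · intro hall
    have hsub2 : (List.range boxes.length).map (fun m : Nat => (m : Int)) ⊆ O := by
      intro x hx
      obtain ⟨m, hmr, rfl⟩ := List.mem_map.mp hx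
      exact hcomp m (hall m (List.mem_range.mp hmr))
    have h1 := (List.subperm_of_subset hnd hsub).length_le
    have h2 := (List.subperm_of_subset hRnd hsub2).length_le
    omega

-- ---- B side: the fixed-point passes mark exactly the reachable boxes ----

-- soundness + monotonicity of one inner key loop, given the opening box i is reachable
theorem inner_sound (boxes : List (List Int)) (l : List Int)
    (hkeys : ∀ k ∈ l, 0 < k → k < (boxes.length : Int) → Reach boxes k.toNat) :
    ∀ (st : List Bool × Bool), st.1.length = boxes.length →
    (∀ m, m < boxes.length → st.1.getD m false = true → Reach boxes m) →
    ((l.foldl (innerC boxes.length) st).1.length = boxes.length) ∧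
    (∀ m, st.1.getD m false = true → (l.foldl (innerC boxes.length) st).1.getD m false = true) ∧
    (∀ m, m < boxes.length → (l.foldl (innerC boxes.length) st).1.getD m false = true →
      Reach boxes m) := by
  induction l with
  | nil =>
    intro st hlen hsnd
    exact ⟨hlen, fun m h => h, hsnd⟩
  | cons k l ih =>
    intro st hlen hsnd
    simp only [List.foldl_cons]
    by_cases hg : 0 < k ∧ k < ((boxes.length : Nat) : Int) ∧
        PySem.List.pyGetD st.1 k true = false
    · have hstep : innerC boxes.length st k = (st.1.set k.toNat true, true) := by
        simp only [innerC, if_pos hg]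
        rw [PySem.List.pySetD_of_nonneg _ _ (le_of_lt hg.1)]
      rw [hstep]
      have hkn : k.toNat < boxes.length := by omega
      have hRk : Reach boxes k.toNat := hkeys k List.mem_cons_self hg.1 hg.2.1
      have hlen1 : (st.1.set k.toNat true).length = boxes.length := by simpa using hlen
      obtain ⟨a, b, c⟩ := ih (fun x hx h1 h2 => hkeys x (List.mem_cons_of_mem _ hx) h1 h2)
        (st.1.set k.toNat true, true) hlen1
        (by
          intro m hm hmt
          by_cases hmk : m = k.toNat
          · subst hmk; exact hRk
          · rw [getD_set_true_ne _ _ _ _ hmk] at hmt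
            exact hsnd m hm hmt)
      exact ⟨a, fun m h => b m (getD_set_true_mono _ _ _ h), c⟩
    · have hstep : innerC boxes.length st k = st := by simp [innerC, hg]
      rw [hstep]
      exact ih (fun x hx h1 h2 => hkeys x (List.mem_cons_of_mem _ hx) h1 h2) st hlen hsnd

-- soundness + monotonicity of any sequence of pass steps
theorem pass_sound (boxes : List (List Int)) (L : List Nat)
    (hL : ∀ i ∈ L, i < boxes.length) :
    ∀ (st : List Bool × Bool), st.1.length = boxes.length →
    (∀ m, m < boxes.length → st.1.getD m false = true → Reach boxes m) →
    ((L.foldl (passStep boxes boxes.length) st).1.length = boxes.length) ∧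
    (∀ m, st.1.getD m false = true →
      (L.foldl (passStep boxes boxes.length) st).1.getD m false = true) ∧
    (∀ m, m < boxes.length → (L.foldl (passStep boxes boxes.length) st).1.getD m false = true →
      Reach boxes m) := by
  induction L with
  | nil =>
    intro st hlen hsnd
    exact ⟨hlen, fun m h => h, hsnd⟩
  | cons i L ih =>
    intro st hlen hsnd
    simp only [List.foldl_cons]
    by_cases hr : PySem.List.pyGetD st.1 (i : Int) false = true
    · have hstep : passStep boxes boxes.length st i =
          (PySem.List.pyGetD boxes (i : Int) []).foldl (innerC boxes.length) st := by
        simp [passStep, hr]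
      rw [hstep]
      have hRi : Reach boxes i := by
        rw [PySem.List.pyGetD_natCast] at hr
        exact hsnd i (hL i List.mem_cons_self) hr
      have hbl : PySem.List.pyGetD boxes (i : Int) [] = boxes.getD i [] :=
        PySem.List.pyGetD_natCast _ _ _
      have hkeys : ∀ k ∈ PySem.List.pyGetD boxes (i : Int) [],
          0 < k → k < (boxes.length : Int) → Reach boxes k.toNat := by
        intro k hk h1 h2
        rw [hbl] at hk
        refine Relation.ReflTransGen.tail hRi ⟨by omega, by omega, ?_⟩
        rwa [show ((k.toNat : Nat) : Int) = k from by omega]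
      obtain ⟨a, b, c⟩ := inner_sound boxes _ hkeys st hlen hsnd
      obtain ⟨a', b', c'⟩ := ih (fun j hj => hL j (List.mem_cons_of_mem _ hj)) _ a c
      exact ⟨a', fun m h => b' m (b m h), c'⟩
    · have hstep : passStep boxes boxes.length st i = st := by simp [passStep, hr]
      rw [hstep]
      exact ih (fun j hj => hL j (List.mem_cons_of_mem _ hj)) st hlen hsnd

-- the changed flag only ever goes false → true
theorem inner_flag_mono (n : Nat) (l : List Int) (st : List Bool × Bool) (h : st.2 = true) :
    (l.foldl (innerC n) st).2 = true := by
  induction l generalizing st with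
  | nil => exact h
  | cons k l ih =>
    simp only [List.foldl_cons]
    apply ih
    by_cases hg : 0 < k ∧ k < (n : Int) ∧ PySem.List.pyGetD st.1 k true = false
    · simp [innerC, hg]
    · simpa [innerC, hg]

theorem pass_flag_mono (boxes : List (List Int)) (n : Nat) (L : List Nat)
    (st : List Bool × Bool) (h : st.2 = true) :
    (L.foldl (passStep boxes n) st).2 = true := by
  induction L generalizing st with
  | nil => exact h
  | cons i L ih =>
    simp only [List.foldl_cons]
    apply ih
    by_cases hr : PySem.List.pyGetD st.1 (i : Int) false = true
    · simp only [passStep, if_pos hr]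
      exact inner_flag_mono n _ st h
    · simpa [passStep, hr]

-- a pass whose flag comes out false changed nothing and certifies closure
theorem inner_nochange (n : Nat) (l : List Int) (st : List Bool × Bool)
    (h : (l.foldl (innerC n) st).2 = false) :
    l.foldl (innerC n) st = st ∧
    ∀ k ∈ l, ¬(0 < k ∧ k < (n : Int) ∧ PySem.List.pyGetD st.1 k true = false) := by
  induction l generalizing st with
  | nil => exact ⟨rfl, by simp⟩
  | cons k l ih =>
    simp only [List.foldl_cons] at h ⊢
    by_cases hg : 0 < k ∧ k < (n : Int) ∧ PySem.List.pyGetD st.1 k true = false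
    · exfalso
      have : (innerC n st k).2 = true := by simp [innerC, hg]
      rw [inner_flag_mono n l _ this] at h
      simp at h
    · have hstep : innerC n st k = st := by simp [innerC, hg]
      rw [hstep] at h ⊢
      obtain ⟨h1, h2⟩ := ih st h
      refine ⟨h1, ?_⟩
      intro x hx
      rcases List.mem_cons.mp hx with h' | h'
      · subst h'; exact hg
      · exact h2 x h'

theorem pass_nochange (boxes : List (List Int)) (n : Nat) (L : List Nat)
    (st : List Bool × Bool) (h : (L.foldl (passStep boxes n) st).2 = false) :
    L.foldl (passStep boxes n) st = st ∧
    ∀ i ∈ L, PySem.List.pyGetD st.1 (i : Int) false = true →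
      ∀ k ∈ PySem.List.pyGetD boxes (i : Int) [],
        ¬(0 < k ∧ k < (n : Int) ∧ PySem.List.pyGetD st.1 k true = false) := by
  induction L generalizing st with
  | nil => exact ⟨rfl, by simp⟩
  | cons i L ih =>
    simp only [List.foldl_cons] at h ⊢
    by_cases hr : PySem.List.pyGetD st.1 (i : Int) false = true
    · have hstep : passStep boxes n st i =
          (PySem.List.pyGetD boxes (i : Int) []).foldl (innerC n) st := by
        simp [passStep, hr]
      rw [hstep] at h ⊢
      have hflag : ((PySem.List.pyGetD boxes (i : Int) []).foldl (innerC n) st).2 = false := by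
        by_contra hc
        rw [pass_flag_mono boxes n L _ (by
          cases hb : ((PySem.List.pyGetD boxes (i : Int) []).foldl (innerC n) st).2
          · exact absurd hb hc
          · rfl)] at h
        simp at h
      obtain ⟨hin1, hin2⟩ := inner_nochange n _ st hflag
      rw [hin1] at h ⊢
      obtain ⟨h1, h2⟩ := ih st h
      refine ⟨h1, ?_⟩
      intro j hj
      rcases List.mem_cons.mp hj with h' | h'
      · subst h'; exact fun _ => hin2
      · exact h2 j h'
    · have hstep : passStep boxes n st i = st := by simp [passStep, hr]
      rw [hstep] at h ⊢
      obtain ⟨h1, h2⟩ := ih st h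
      refine ⟨h1, ?_⟩
      intro j hj
      rcases List.mem_cons.mp hj with h' | h'
      · subst h'; exact fun hc => absurd hc hr
      · exact h2 j h'

theorem loopC_char (boxes : List (List Int)) (h0n : 0 < boxes.length) :
    ∀ (opened : List Bool),
    opened.length = boxes.length →
    opened.getD 0 false = true →
    (∀ m, m < boxes.length → opened.getD m false = true → Reach boxes m) →
    (loopC boxes boxes.length opened).length = boxes.length ∧
    (∀ m, m < boxes.length →
      ((loopC boxes boxes.length opened).getD m false = true ↔ Reach boxes m)) := by
  intro opened
  induction opened using loopC.induct boxes boxes.length with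
  | case1 opened hst ih =>
    intro hlen h0 hsnd
    rw [loopC, dif_pos hst]
    obtain ⟨a, b, c⟩ := pass_sound boxes (List.range boxes.length)
      (fun i hi => List.mem_range.mp hi) (opened, false) hlen hsnd
    exact ih a (b 0 h0) c
  | case2 opened hst =>
    intro hlen h0 hsnd
    rw [loopC, dif_neg hst]
    have hflag : (passB boxes boxes.length opened).2 = false := by
      cases hb : (passB boxes boxes.length opened).2
      · rfl
      · exact absurd hb hst
    obtain ⟨hfix, hclos⟩ := pass_nochange boxes boxes.length (List.range boxes.length)
      (opened, false) hflag
    have hres : passB boxes boxes.length opened = (opened, false) := hfix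
    rw [show (passB boxes boxes.length opened).1 = opened from by rw [hres]]
    have hcompl : ∀ m, Reach boxes m → opened.getD m false = true := by
      intro m hr
      induction hr with
      | refl => exact h0
      | tail hab e ihr =>
        rename_i c
        rename_i b
        have han : b < boxes.length := reach_lt boxes h0n hab
        have hread : PySem.List.pyGetD opened (b : Int) false = true := by
          rw [PySem.List.pyGetD_natCast]; exact ihr
        have hkb : (c : Int) ∈ PySem.List.pyGetD boxes (b : Int) [] := by
          rw [PySem.List.pyGetD_natCast]; exact e.2.2
        have := hclos b (List.mem_range.mpr han) hread (c : Int) hkb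
        have hb0 : (0 : Int) < (c : Int) := by exact_mod_cast e.1
        have hbn : (c : Int) < (boxes.length : Int) := by exact_mod_cast e.2.1
        have hget : PySem.List.pyGetD opened (c : Int) true = true := by
          by_contra hc
          exact this ⟨hb0, hbn, by simpa using hc⟩
        rw [PySem.List.pyGetD_natCast] at hget
        have hclen : c < opened.length := by omega
        rw [List.getD_eq_getElem _ _ hclen] at hget ⊢
        exact hget
    exact ⟨hlen, fun m hm => ⟨fun h => hsnd m hm h, fun hr => hcompl m hr⟩⟩

theorem canUnlockAll_alt_char (boxes : List (List Int)) (hne : boxes ≠ []) :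
    canUnlockAll_alt boxes = true ↔ ∀ j < boxes.length, Reach boxes j := by
  have h0n : 0 < boxes.length := List.length_pos_of_ne_nil hne
  show ((loopC boxes boxes.length
      (PySem.List.pySetD (List.replicate boxes.length false) 0 true)).all (fun b => b)) = true
    ↔ ∀ j < boxes.length, Reach boxes j
  have hseen0 : PySem.List.pySetD (List.replicate boxes.length false) 0 true
      = (List.replicate boxes.length false).set 0 true := by
    rw [PySem.List.pySetD_of_nonneg _ _ (by omega : (0:Int) ≤ 0)]
    rfl
  rw [hseen0]
  have hlen0 : ((List.replicate boxes.length false).set 0 true).length = boxes.length := by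
    simp
  have hK2 : ((List.replicate boxes.length false).set 0 true).getD 0 false = true :=
    getD_set_true_self _ 0 (by simpa using h0n)
  have hzero : ∀ m : Nat, m < boxes.length →
      ((List.replicate boxes.length false).set 0 true).getD m false = true → m = 0 := by
    intro m hm h
    by_contra hm0
    rw [getD_set_true_ne _ 0 m false hm0, List.getD_replicate false hm] at h
    simp at h
  obtain ⟨hlenO, hiff⟩ := loopC_char boxes h0n
    ((List.replicate boxes.length false).set 0 true) hlen0 hK2
    (by
      intro m hm h
      rw [hzero m hm h]
      exact Relation.ReflTransGen.refl)
  constructor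
  · intro hall j hj
    refine (hiff j hj).mp ?_
    rw [List.getD_eq_getElem _ _ (by omega : j < (loopC boxes boxes.length
      ((List.replicate boxes.length false).set 0 true)).length)]
    exact List.all_eq_true.mp hall _ (List.getElem_mem _)
  · intro hall
    refine List.all_eq_true.mpr ?_
    intro x hx
    obtain ⟨i, hi, rfl⟩ := List.mem_iff_getElem.mp hx
    have hi' : i < boxes.length := by omega
    have := (hiff i hi').mpr (hall i hi')
    rwa [List.getD_eq_getElem _ _ hi] at this

-- ===== VERDICT (by name: the statement is the Claim_ definition above) =====
theorem canUnlockAll_spec : Claim_equal_canUnlockAll := by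
  intro boxes _ hpre
  unfold Spec_canUnlockAll
  rw [Bool.eq_iff_iff, canUnlockAll_char boxes hpre, canUnlockAll_alt_char boxes hpre]
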